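-- pv_equiv track=rewrite | github.com/GaMaDeCa/Python-Collection | Desafios/Matrix.py | gerarMatrixOrdenada
-- ===== SOURCE A (Python) =====
-- def gerarMatrixOrdenada(z,largura,altura):
--     matrix=[]
--     for y in range(z,altura+z):
--         w=0
--         dados=[]
--         for x in range(largura):
--             dados.append(y+w)
--             w+=1
--         matrix.append(dados)
--     return matrix
-- ===== SOURCE B (Python) =====
-- def gerarMatrixOrdenada(z, largura, altura):
--     # incremental: build the first row once, then derive each next row by +1
--     if altura <= 0:
--         return []
--     row = list(range(z, z + largura))
--     matrix = []
--     for _ in range(altura):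
--         matrix.append(row)
--         row = [e + 1 for e in row]
--     return matrix
-- ===== Notes on version B (the rewrite author's own statement) =====
-- stated objective: alternative
-- what changed: Instead of recomputing y+w for every cell with a nested counter loop, B builds the first row once with range(z, z+largura) and derives each subsequent row incrementally by mapping +1 over the previous row.
import Mathlib
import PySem

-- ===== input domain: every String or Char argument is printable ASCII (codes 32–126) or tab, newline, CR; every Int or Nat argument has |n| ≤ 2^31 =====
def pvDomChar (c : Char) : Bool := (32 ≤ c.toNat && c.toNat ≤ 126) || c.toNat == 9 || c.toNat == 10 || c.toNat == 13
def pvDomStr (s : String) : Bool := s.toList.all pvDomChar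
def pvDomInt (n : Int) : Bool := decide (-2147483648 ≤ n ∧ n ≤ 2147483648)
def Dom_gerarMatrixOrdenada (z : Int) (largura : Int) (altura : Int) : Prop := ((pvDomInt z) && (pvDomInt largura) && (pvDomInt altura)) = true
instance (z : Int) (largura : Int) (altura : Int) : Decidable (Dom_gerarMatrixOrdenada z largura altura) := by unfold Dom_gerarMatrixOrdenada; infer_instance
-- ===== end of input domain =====

-- B replaces the per-cell counter recomputation by an incremental row accumulator (alternative decomposition, same cost).

-- ===== PORT A =====
def gerarMatrixOrdenada (z : Int) (largura : Int) (altura : Int) : List (List Int) :=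
  (PySem.List.pyRange z (altura + z) 1).foldl (fun matrix y =>
    let st := (PySem.List.pyRange 0 largura 1).foldl
      (fun (st : List Int × Int) _x => (st.1 ++ [y + st.2], st.2 + 1)) ([], 0)
    matrix ++ [st.1]) []

-- ===== PORT B =====
-- the loop 'for _ in range(altura): matrix.append(row); row = [e+1 for e in row]'
def pvRowLoop (n : Nat) (row : List Int) (matrix : List (List Int)) : List (List Int) :=
  match n with
  | 0 => matrix
  | n+1 => pvRowLoop n (row.map (· + 1)) (matrix ++ [row])

def gerarMatrixOrdenada_alt (z : Int) (largura : Int) (altura : Int) : List (List Int) :=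
  if altura ≤ 0 then []
  else pvRowLoop altura.toNat (PySem.List.pyRange z (z + largura) 1) []

-- ===== PRECONDITION & SPEC =====
def Spec_gerarMatrixOrdenada (z : Int) (largura : Int) (altura : Int) (out : List (List Int)) : Prop := out = gerarMatrixOrdenada_alt z largura altura
instance (z : Int) (largura : Int) (altura : Int) (out : List (List Int)) : Decidable (Spec_gerarMatrixOrdenada z largura altura out) := by unfold Spec_gerarMatrixOrdenada; infer_instance

-- ===== CLAIM (what is proved, stated in full; the proofs are below) =====
def Claim_equal_gerarMatrixOrdenada : Prop := ∀ (z : Int) (largura : Int) (altura : Int), Dom_gerarMatrixOrdenada z largura altura → Spec_gerarMatrixOrdenada z largura altura (gerarMatrixOrdenada z largura altura)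

-- ===== LEMMAS AND PROOFS =====

-- the segment A's inner loop appends: y+w, y+(w+1), …, n elements
def pvSeg (y : Int) (w : Int) : Nat → List Int
  | 0 => []
  | n+1 => (y + w) :: pvSeg y (w + 1) n

theorem pvInnerA (y : Int) : ∀ (l : List Int) (d : List Int) (w : Int),
    (l.foldl (fun (st : List Int × Int) _x => (st.1 ++ [y + st.2], st.2 + 1)) (d, w))
      = (d ++ pvSeg y w l.length, w + l.length) := by
  intro l
  induction l with
  | nil => intro d w; simp [pvSeg]
  | cons h t ih =>
    intro d w
    simp only [List.foldl_cons, ih, pvSeg, List.length_cons]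
    refine Prod.ext ?_ ?_
    · simp
    · push_cast; ring

theorem pvSeg_eq (y : Int) : ∀ (n : Nat) (w : Int),
    pvSeg y w n = (List.range n).map (fun (k : Nat) => y + w + (k : Int)) := by
  intro n
  induction n with
  | zero => intro w; simp [pvSeg]
  | succ n ih =>
    intro w
    simp only [pvSeg, ih, List.range_succ_eq_map, List.map_cons, List.map_map, List.cons.injEq]
    constructor
    · simp
    · apply List.map_congr_left
      intro k _
      simp only [Function.comp]
      push_cast; ring

-- appending singletons in a fold is a map
theorem pvFoldMap (f : Int → List Int) : ∀ (l : List Int) (acc : List (List Int)),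
    l.foldl (fun m y => m ++ [f y]) acc = acc ++ l.map f := by
  intro l
  induction l with
  | nil => intro acc; simp
  | cons h t ih => intro acc; simp [ih]

theorem pvRowLoop_eq : ∀ (n : Nat) (row : List Int) (m : List (List Int)),
    pvRowLoop n row m = m ++ (List.range n).map (fun (i : Nat) => row.map (fun e => e + (i : Int))) := by
  intro n
  induction n with
  | zero => intro row m; simp [pvRowLoop]
  | succ n ih =>
    intro row m
    simp only [pvRowLoop, ih, List.range_succ_eq_map, List.map_cons, List.map_map,
      List.append_assoc, List.cons_append, List.nil_append]
    congr 1
    congr 1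
    · simp
    · apply List.map_congr_left
      intro i _
      simp only [Function.comp]
      apply List.map_congr_left
      intro e _
      simp only [Function.comp_apply]
      push_cast
      ring

-- ===== VERDICT (by name: the statement is the Claim_ definition above) =====
theorem gerarMatrixOrdenada_spec : Claim_equal_gerarMatrixOrdenada := by
  intro z largura altura _
  unfold Spec_gerarMatrixOrdenada gerarMatrixOrdenada gerarMatrixOrdenada_alt
  by_cases ha : altura ≤ 0
  · have hnil : PySem.List.pyRange z (altura + z) 1 = [] :=
      PySem.List.pyRange_one_eq_nil (by omega)
    simp [ha, hnil]
  simp only [ha, if_false]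
  simp only [pvInnerA, List.nil_append]
  rw [pvFoldMap (fun y => pvSeg y 0 (PySem.List.pyRange 0 largura 1).length), pvRowLoop_eq]
  simp only [List.nil_append, PySem.List.length_pyRange_one, Int.sub_zero]
  rw [PySem.List.pyRange_one z (altura + z), PySem.List.pyRange_one z (z + largura)]
  have h1 : (altura + z - z).toNat = altura.toNat := by omega
  have h2 : (z + largura - z).toNat = largura.toNat := by omega
  rw [h1, h2, List.map_map]
  apply List.map_congr_left
  intro i _
  simp only [Function.comp, pvSeg_eq, List.map_map]
  apply List.map_congr_left
  intro k _
  simp only [Function.comp]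
  ring
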